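-- pv_equiv track=rewrite | github.com/JimBoHa/Infrastructure-Dashboard | tools/check_openapi_coverage.py | _normalize_rust_path
-- ===== SOURCE A (Python) =====
-- def _normalize_rust_path(path: str) -> str:
--     path = path.strip()
--     if not path.startswith("/"):
--         path = "/" + path
--     parts = []
--     for segment in path.split("/"):
--         if segment.startswith(":") and len(segment) > 1:
--             parts.append("{" + segment[1:] + "}")
--         else:
--             parts.append(segment)
--     return "/".join(parts).replace("//", "/")
-- ===== SOURCE B (Python) =====
-- def _normalize_rust_path(path: str) -> str:
--     path = path.strip()
--     if not path.startswith("/"):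
--         path = "/" + path
--     # pass 1: rewrite each segment-start ':name' (nonempty name) to '{name}'
--     out = []
--     i = 0
--     n = len(path)
--     while i < n:
--         if (path[i] == "/" and i + 2 < n and path[i + 1] == ":"
--                 and path[i + 2] != "/"):
--             j = i + 2
--             while j < n and path[j] != "/":
--                 j += 1
--             out.append("/{" + path[i + 2:j] + "}")
--             i = j
--         else:
--             out.append(path[i])
--             i += 1
--     s = "".join(out)
--     # pass 2: single left-to-right non-overlapping collapse of '//' -> '/'
--     res = []
--     k = 0
--     m = len(s)
--     while k < m:
--         if s[k] == "/" and k + 1 < m and s[k + 1] == "/":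
--             res.append("/")
--             k += 2
--         else:
--             res.append(s[k])
--             k += 1
--     return "".join(res)
-- ===== Notes on version B (the rewrite author's own statement) =====
-- stated objective: alternative
-- what changed: A tokenizes the path with split on slashes, rewrites each colon-parameter segment in a loop and re-joins before collapsing doubled slashes; B never splits: it makes one direct index scan over the string rewriting slash-colon-name runs in place, then a second explicit single-pass scan doing the non-overlapping doubled-slash collapse.
import Mathlib
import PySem

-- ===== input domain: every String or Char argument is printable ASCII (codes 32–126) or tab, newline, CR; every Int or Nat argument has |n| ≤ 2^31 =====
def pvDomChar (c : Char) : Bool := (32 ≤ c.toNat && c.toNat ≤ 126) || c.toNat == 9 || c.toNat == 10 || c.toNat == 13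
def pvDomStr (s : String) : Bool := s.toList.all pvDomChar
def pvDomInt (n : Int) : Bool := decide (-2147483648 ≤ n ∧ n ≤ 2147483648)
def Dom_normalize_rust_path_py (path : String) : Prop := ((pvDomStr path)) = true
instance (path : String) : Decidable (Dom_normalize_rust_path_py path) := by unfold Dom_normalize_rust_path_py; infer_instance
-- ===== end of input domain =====

-- B replaces A's split/loop/join tokenizer by one direct character scan that rewrites '/:name'
-- runs in place, plus a literal single-pass '//'→'/' collapse (objective: alternative).

-- ===== PORT A =====
-- body of A's per-segment loop: ':name' (len > 1) becomes '{name}'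
def trSeg (segment : List Char) : List Char :=
  if PySem.Chars.startswith segment [':'] && segment.length > 1 then
    ['{'] ++ PySem.List.slice segment (some 1) none ++ ['}']
  else segment

def normalize_rust_path_py (path : String) : String :=
  let p0 := PySem.Chars.strip path.toList
  let p := if PySem.Chars.startswith p0 ['/'] then p0 else ['/'] ++ p0
  let parts := (PySem.Chars.splitOn p ['/']).map trSeg
  String.ofList (PySem.Chars.replace (PySem.Chars.join ['/'] parts) ['/', '/'] ['/'])

-- ===== PORT B =====
-- pass 1 of Source B: the while loop rewriting each '/:name' run to '/{name}'
def scan1 : List Char → List Char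
  | [] => []
  | '/' :: ':' :: d :: rest =>
      if d = '/' then '/' :: scan1 (':' :: d :: rest)
      else
        '/' :: '{' :: (((d :: rest).takeWhile (· ≠ '/')) ++ '}' :: scan1 ((d :: rest).dropWhile (· ≠ '/')))
  | c :: rest => c :: scan1 rest
  termination_by cs => cs.length
  decreasing_by
    · simp
    · simp only [List.length_cons]
      have := List.length_dropWhile_le (· ≠ '/') (d :: rest)
      simp at this ⊢; omega
    · simp

-- pass 2 of Source B: the while loop collapsing '//' to '/' left to right, non-overlapping
def scan2 : List Char → List Char
  | '/' :: '/' :: rest => '/' :: scan2 rest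
  | c :: rest => c :: scan2 rest
  | [] => []

def normalize_rust_path_py_alt (path : String) : String :=
  let p0 := PySem.Chars.strip path.toList
  let p := if PySem.Chars.startswith p0 ['/'] then p0 else ['/'] ++ p0
  String.ofList (scan2 (scan1 p))

-- ===== PRECONDITION & SPEC =====
def Spec_normalize_rust_path_py (path : String) (out : String) : Prop := out = normalize_rust_path_py_alt path
instance (path : String) (out : String) : Decidable (Spec_normalize_rust_path_py path out) := by unfold Spec_normalize_rust_path_py; infer_instance

-- ===== CLAIM (what is proved, stated in full; the proofs are below) =====
def Claim_equal_normalize_rust_path_py : Prop := ∀ (path : String), Dom_normalize_rust_path_py path → Spec_normalize_rust_path_py path (normalize_rust_path_py path)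

-- ===== LEMMAS AND PROOFS =====

-- recursive characterisation of splitting on '/'
def mySplit (cs : List Char) : List (List Char) :=
  match h : cs.dropWhile (· ≠ '/') with
  | [] => [cs.takeWhile (· ≠ '/')]
  | _ :: r => cs.takeWhile (· ≠ '/') :: mySplit r
  termination_by cs.length
  decreasing_by
    have := List.length_dropWhile_le (· ≠ '/') cs
    rw [h] at this; simp at this; omega

-- prepend a prefix onto the first piece of a split
def consHd (pre : List Char) : List (List Char) → List (List Char)
  | [] => [pre]
  | x :: xs => (pre ++ x) :: xs

theorem mySplit_ne_nil (cs : List Char) : mySplit cs ≠ [] := by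
  rw [mySplit]; split <;> simp

theorem consHd_nil (l : List (List Char)) (h : l ≠ []) : consHd [] l = l := by
  cases l with
  | nil => exact absurd rfl h
  | cons x xs => simp [consHd]

theorem mySplit_cons_slash (q : List Char) : mySplit ('/' :: q) = [] :: mySplit q := by
  rw [mySplit]
  split
  · rename_i h; simp at h
  · rename_i d r h
    simp only [List.dropWhile_cons] at h
    simp at h
    simp [h.2]

theorem mySplit_cons_ne (c : Char) (rest : List Char) (hc : c ≠ '/') (pre : List Char) :
    consHd pre (mySplit (c :: rest)) = consHd (pre ++ [c]) (mySplit rest) := by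
  rw [mySplit, mySplit]
  have hdw : List.dropWhile (fun x => decide (x ≠ '/')) (c :: rest) = List.dropWhile (fun x => decide (x ≠ '/')) rest := by
    simp [hc]
  have htw : List.takeWhile (fun x => decide (x ≠ '/')) (c :: rest) = c :: List.takeWhile (fun x => decide (x ≠ '/')) rest := by
    simp [hc]
  split
  · rename_i h1
    rw [hdw] at h1
    split
    · simp only [consHd, htw]; simp
    · rename_i d r h2
      rw [h1] at h2; cases h2
  · rename_i d r h1
    rw [hdw] at h1
    split
    · rename_i h2; rw [h2] at h1; cases h1
    · rename_i d2 r2 h2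
      rw [h2] at h1; injection h1 with e1 e2; subst e2
      simp only [consHd, htw]; simp

theorem splitOn_go_eq (fuel : Nat) (l cur : List Char) (acc : List (List Char))
    (h : l.length ≤ fuel) :
    PySem.Chars.splitOn.go ['/'] fuel l cur acc = acc.reverse ++ consHd cur.reverse (mySplit l) := by
  induction fuel generalizing l cur acc with
  | zero =>
    have : l = [] := by cases l <;> simp_all
    subst this
    rw [PySem.Chars.splitOn.go]
    rw [mySplit]
    simp [consHd]
  | succ f ih =>
    cases l with
    | nil =>
      rw [PySem.Chars.splitOn.go]
      · rw [mySplit]; simp [consHd]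
      · omega
    | cons c rest =>
      rw [PySem.Chars.splitOn.go]
      by_cases hc : c = '/'
      · subst hc
        have hp : ['/'].isPrefixOf ('/' :: rest) = true := by simp
        simp only [hp, if_true, List.length_singleton, List.drop_succ_cons, List.drop_zero]
        rw [ih rest [] (cur.reverse :: acc) (by simpa using h)]
        rw [mySplit_cons_slash]
        simp only [List.reverse_nil, List.reverse_cons, consHd]
        cases hms : mySplit rest with
        | nil => exact absurd hms (mySplit_ne_nil rest)
        | cons x xs => simp
      · have hp : ['/'].isPrefixOf (c :: rest) = false := by
          rw [List.isPrefixOf]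
          simpa using fun h => absurd h.symm hc
        simp only [hp, Bool.false_eq_true, if_false]
        rw [ih rest (c :: cur) acc (by simpa using h)]
        rw [mySplit_cons_ne c rest hc cur.reverse]
        simp

theorem splitOn_eq (cs : List Char) : PySem.Chars.splitOn cs ['/'] = mySplit cs := by
  rw [PySem.Chars.splitOn]
  rw [splitOn_go_eq (cs.length + 1) cs [] [] (by omega)]
  simp [consHd_nil _ (mySplit_ne_nil cs)]

theorem scan2_cons_ne (c : Char) (t : List Char)
    (h : ['/','/'].isPrefixOf (c :: t) = false) : scan2 (c :: t) = c :: scan2 t := by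
  cases t with
  | nil =>
    rw [scan2]
    all_goals intro rest h1 h2; cases h2
  | cons d t' =>
    by_cases hcd : c = '/' ∧ d = '/'
    · exfalso; obtain ⟨hc, hd⟩ := hcd; subst hc; subst hd; simp [List.isPrefixOf] at h
    · rw [scan2]
      all_goals intro rest h1 h2
      injection h2 with e1 e2
      exact hcd ⟨h1, e1⟩

theorem replace_go_eq (fuel : Nat) (l acc : List Char) (h : l.length ≤ fuel) :
    PySem.Chars.replace.go ['/', '/'] ['/'] fuel l acc = acc.reverse ++ scan2 l := by
  induction fuel generalizing l acc with
  | zero =>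
    have : l = [] := by cases l <;> simp_all
    subst this
    rw [PySem.Chars.replace.go, scan2]
  | succ f ih =>
    cases l with
    | nil =>
      rw [PySem.Chars.replace.go]
      · rw [scan2]; simp
      · omega
    | cons c t =>
      rw [PySem.Chars.replace.go]
      by_cases hp : ['/','/'].isPrefixOf (c :: t) = true
      · obtain ⟨rest, hrest⟩ : ∃ rest, c :: t = '/' :: '/' :: rest := by
          cases t with
          | nil => simp [List.isPrefixOf] at hp
          | cons d t' =>
            simp [List.isPrefixOf] at hp
            exact ⟨t', by rw [← hp.1, ← hp.2]⟩
        rw [if_pos hp, hrest]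
        have ht : List.drop (['/','/'] : List Char).length ('/' :: '/' :: rest) = rest := by simp
        rw [ht]
        rw [ih rest _ (by rw [hrest] at h; simp at h; omega)]
        rw [scan2]
        simp
      · simp only [Bool.not_eq_true] at hp
        rw [if_neg (by simp [hp])]
        rw [ih t _ (by simpa using h)]
        rw [scan2_cons_ne c t hp]
        simp

theorem replace_eq_scan2 (cs : List Char) :
    PySem.Chars.replace cs ['/', '/'] ['/'] = scan2 cs := by
  rw [PySem.Chars.replace]
  simp only [List.isEmpty_cons, Bool.false_eq_true, if_false]
  exact replace_go_eq cs.length cs [] (by omega)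

theorem dropWhile_head_false (p : Char → Bool) (q : List Char) (d : Char) (r : List Char)
    (h : q.dropWhile p = d :: r) : p d = false := by
  induction q with
  | nil => cases h
  | cons c t ih =>
    rw [List.dropWhile_cons] at h
    by_cases hp : p c
    · simp [hp] at h; exact ih h
    · simp [hp] at h; rw [← h.1]; simpa using hp

theorem intercalate_cons_ne_nil (sep a : List Char) (l : List (List Char)) (h : l ≠ []) :
    List.intercalate sep (a :: l) = a ++ sep ++ List.intercalate sep l := by
  cases l with
  | nil => exact absurd rfl h
  | cons y ys => simp [List.intercalate, List.intersperse]

theorem trSeg_nil : trSeg [] = [] := by decide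

theorem trSeg_colon_single : trSeg [':'] = [':'] := by decide

theorem trSeg_colon (d : Char) (r : List Char) : trSeg (':' :: d :: r) = '{' :: ((d :: r) ++ ['}']) := by
  rw [trSeg]
  have h1 : PySem.Chars.startswith (':' :: d :: r) [':'] = true := by
    simp [PySem.Chars.startswith, List.isPrefixOf]
  have h2 : PySem.List.slice (':' :: d :: r) (some 1) none = d :: r := by
    simp [PySem.List.slice, PySem.List.clampIdx]
  simp [h1, h2]

theorem trSeg_ne_colon (a : Char) (l : List Char) (ha : a ≠ ':') : trSeg (a :: l) = a :: l := by
  rw [trSeg]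
  have h1 : PySem.Chars.startswith (a :: l) [':'] = false := by
    rw [PySem.Chars.startswith, List.isPrefixOf]
    simpa using fun h => absurd h.symm ha
  simp [h1]

theorem scan1_cons_slash_ne_colon (c : Char) (rest : List Char) (hc : c ≠ ':') :
    scan1 ('/' :: c :: rest) = '/' :: scan1 (c :: rest) := by
  simp [scan1, hc]

theorem scan1_cons_ne (c : Char) (rest : List Char) (hc : c ≠ '/') : scan1 (c :: rest) = c :: scan1 rest := by
  simp [scan1, hc]

theorem scan1_copy (cs : List Char) :
    scan1 cs = cs.takeWhile (· ≠ '/') ++ scan1 (cs.dropWhile (· ≠ '/')) := by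
  induction cs with
  | nil => simp
  | cons c rest ih =>
    by_cases hc : c = '/'
    · subst hc; simp
    · rw [scan1_cons_ne c rest hc, ih]
      simp [hc]

theorem scan1_slash (q : List Char) :
    scan1 ('/' :: q) = '/' :: (trSeg (q.takeWhile (· ≠ '/')) ++ scan1 (q.dropWhile (· ≠ '/'))) := by
  cases q with
  | nil => simp [scan1, trSeg_nil]
  | cons a q' =>
    by_cases ha : a = ':'
    · subst ha
      cases q' with
      | nil =>
        simp [scan1, trSeg_colon_single]
      | cons d r =>
        by_cases hd : d = '/'
        · subst hd
          rw [scan1, if_pos rfl]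
          rw [scan1_cons_ne ':' ('/' :: r) (by decide)]
          have htw : (':' :: '/' :: r).takeWhile (· ≠ '/') = [':'] := by simp
          have hdw : (':' :: '/' :: r).dropWhile (· ≠ '/') = '/' :: r := by simp
          rw [htw, hdw, trSeg_colon_single]
          simp
        · rw [scan1, if_neg hd]
          have htw : (':' :: d :: r).takeWhile (· ≠ '/') = ':' :: (d :: r).takeWhile (· ≠ '/') := by
            simp
          have hdw : (':' :: d :: r).dropWhile (· ≠ '/') = (d :: r).dropWhile (· ≠ '/') := by
            simp
          rw [htw, hdw]
          cases htake : (d :: r).takeWhile (· ≠ '/') with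
          | nil =>
            exfalso
            rw [List.takeWhile_cons] at htake
            simp [hd] at htake
          | cons x xs =>
            rw [trSeg_colon]
            simp
    · by_cases ha2 : a = '/'
      · subst ha2
        rw [scan1_cons_slash_ne_colon '/' q' (by decide)]
        simp [trSeg_nil]
      · rw [scan1_cons_slash_ne_colon a q' ha]
        rw [scan1_copy (a :: q')]
        have htw : (a :: q').takeWhile (· ≠ '/') = a :: q'.takeWhile (· ≠ '/') := by
          simp [ha2]
        have hdw : (a :: q').dropWhile (· ≠ '/') = q'.dropWhile (· ≠ '/') := by
          simp [ha2]
        rw [htw, hdw, trSeg_ne_colon a _ ha]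

theorem scan1_eq_join (q : List Char) :
    scan1 ('/' :: q) = '/' :: List.intercalate ['/'] ((mySplit q).map trSeg) := by
  rw [scan1_slash, mySplit]
  split
  · rename_i h
    rw [h, scan1]
    simp [List.intercalate]
  · rename_i d r h
    have hd : d = '/' := by
      have := dropWhile_head_false _ q d r h
      simpa using this
    subst hd
    rw [h]
    have hlt : r.length < q.length := by
      have := List.length_dropWhile_le (· ≠ '/') q
      rw [h] at this; simp at this; omega
    rw [scan1_eq_join r]
    rw [List.map_cons,
        intercalate_cons_ne_nil ['/'] _ _ (by simp [mySplit_ne_nil r])]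
    simp
  termination_by q.length
  decreasing_by exact hlt

theorem main_eq (q : List Char) :
    PySem.Chars.join ['/'] ((PySem.Chars.splitOn ('/' :: q) ['/']).map trSeg) = scan1 ('/' :: q) := by
  rw [splitOn_eq, mySplit_cons_slash, PySem.Chars.join, List.map_cons, trSeg_nil]
  rw [intercalate_cons_ne_nil ['/'] [] _ (by simp [mySplit_ne_nil q])]
  rw [scan1_eq_join q]
  simp

theorem ports_agree (p : List Char) (hp : ∃ q, p = '/' :: q) :
    PySem.Chars.replace (PySem.Chars.join ['/'] ((PySem.Chars.splitOn p ['/']).map trSeg)) ['/','/'] ['/']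
      = scan2 (scan1 p) := by
  obtain ⟨q, rfl⟩ := hp
  rw [replace_eq_scan2, main_eq]

-- ===== VERDICT (by name: the statement is the Claim_ definition above) =====
theorem normalize_rust_path_py_spec : Claim_equal_normalize_rust_path_py := by
  intro path _
  unfold Spec_normalize_rust_path_py normalize_rust_path_py normalize_rust_path_py_alt
  by_cases h : PySem.Chars.startswith (PySem.Chars.strip path.toList) ['/'] = true
  · simp only [h, if_true]
    refine congrArg _ (ports_agree _ ?_)
    obtain ⟨t, ht⟩ := (PySem.Chars.startswith_iff _ _).mp h
    exact ⟨t, ht.symm⟩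
  · simp only [h, Bool.false_eq_true, if_false]
    exact congrArg _ (ports_agree _ ⟨_, rfl⟩)
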